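-- pv_equiv track=rewrite | github.com/rajlath/rkl_codes | CoderByte/questions_marks.py | QuestionsMarks
-- ===== SOURCE A (Python) =====
-- def QuestionsMarks(str):
--     nums = [(int(x), i)  for i, x in enumerate(str) if x.isdigit()]
--     counts = 0
--     rets = True
--     has10 = False
--     for i in range(len(nums)):
--         for j in range(i+1, len(nums)):
--             if nums[i][0] + nums[j][0] == 10:
--                 has10=True
--                 current = str[nums[i][1]:nums[j][1]]
--                 if current.count("?") >= 3 : continue
--                 else:
--                     rets = False
--                     break
--     if not has10 : return False
--     return rets
-- ===== SOURCE B (Python) =====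
-- def QuestionsMarks(str):
--     # One pass: running count of '?' seen so far, and for each digit value the
--     # running-'?'-count at its most recent occurrence.  A pair (i, j) summing to 10
--     # fails iff the '?'-count between them is < 3; since the running count is
--     # non-decreasing, it suffices to check the complement digit's LAST occurrence.
--     q = 0
--     last = {}
--     has10 = False
--     for ch in str:
--         if ch == "?":
--             q += 1
--         if ch.isdigit():
--             d = int(ch)
--             c = 10 - d
--             if c in last:
--                 has10 = True
--                 if q - last[c] < 3:
--                     return False
--             last[d] = q
--     return has10
-- ===== Notes on version B (the rewrite author's own statement) =====
-- stated objective: faster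
-- what changed: Replaced the quadratic scan over all digit pairs (with a substring '?'-count per pair) by a single left-to-right pass keeping a running '?' count and, per digit value, the running count at its last occurrence; since the running count is non-decreasing and the complement of d is uniquely 10-d, checking the complement's last occurrence decides every pair.
import Mathlib
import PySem

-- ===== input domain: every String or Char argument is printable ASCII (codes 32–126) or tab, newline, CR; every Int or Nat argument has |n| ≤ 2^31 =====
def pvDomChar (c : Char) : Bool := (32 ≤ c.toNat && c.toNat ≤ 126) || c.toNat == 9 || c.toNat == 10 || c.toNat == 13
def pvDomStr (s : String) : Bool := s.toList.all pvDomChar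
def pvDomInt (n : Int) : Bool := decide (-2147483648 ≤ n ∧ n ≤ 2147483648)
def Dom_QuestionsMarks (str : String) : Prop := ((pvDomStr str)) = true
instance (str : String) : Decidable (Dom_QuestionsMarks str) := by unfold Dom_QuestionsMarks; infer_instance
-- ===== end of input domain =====

-- B replaces A's quadratic all-pairs digit check by a single pass with a running '?'
-- count and a last-occurrence-by-digit-value dict (objective: faster).

-- ===== PORT A =====
-- inner loop `for j in range(i+1, len(nums))`, iterating the entries after nums[i];
-- state is (rets, has10); `break` returns early with (False, True)
def qmInner (str : String) (a : Int × Int) : List (Int × Int) → Bool × Bool → Bool × Bool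
  | [], st => st
  | b :: rest, st =>
    if a.1 + b.1 == 10 then
      if 3 ≤ PySem.Str.count (PySem.Str.slice str (some a.2) (some b.2)) "?" then
        qmInner str a rest (st.1, true)
      else (false, true)
    else qmInner str a rest st

-- outer loop `for i in range(len(nums))`
def qmOuter (str : String) : List (Int × Int) → Bool × Bool → Bool × Bool
  | [], st => st
  | a :: rest, st => qmOuter str rest (qmInner str a rest st)

def QuestionsMarks (str : String) : Bool :=
  let nums : List (Int × Int) :=
    (PySem.List.enumerate str.toList).filterMap
      (fun p => if PySem.Chars.isdigit p.2 then
                  some ((PySem.Int.ofChars? [p.2]).getD 0, p.1) else none)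
  let st := qmOuter str nums (true, false)
  if st.2 = false then false else st.1

-- ===== PORT B =====
def qmAltGo (q : Int) (last : PySem.Dict Int Int) (has10 : Bool) : List Char → Bool
  | [] => has10
  | ch :: rest =>
    let q := if ch == '?' then q + 1 else q
    if PySem.Chars.isdigit ch then
      let d := (PySem.Int.ofChars? [ch]).getD 0
      match last.get? (10 - d) with
      | some qi =>
        if q - qi < 3 then false
        else qmAltGo q (last.insert d q) true rest
      | none => qmAltGo q (last.insert d q) has10 rest
    else qmAltGo q last has10 rest

def QuestionsMarks_alt (str : String) : Bool :=
  qmAltGo 0 PySem.Dict.empty false str.toList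

-- ===== PRECONDITION & SPEC =====
def Spec_QuestionsMarks (str : String) (out : Bool) : Prop := out = QuestionsMarks_alt str
instance (str : String) (out : Bool) : Decidable (Spec_QuestionsMarks str out) := by unfold Spec_QuestionsMarks; infer_instance

-- ===== CLAIM (what is proved, stated in full; the proofs are below) =====
def Claim_equal_QuestionsMarks : Prop := ∀ (str : String), Dom_QuestionsMarks str → Spec_QuestionsMarks str (QuestionsMarks str)

-- ===== LEMMAS AND PROOFS =====

-- digit value of a char, as both ports compute it
def vOf (c : Char) : Int := (PySem.Int.ofChars? [c]).getD 0

-- triples (value, index, prefix-'?'-count) of the digit characters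
def tri : List Char → Int → Int → List (Int × Int × Int)
  | [], _, _ => []
  | c :: cs, s, q =>
    let q' := if c == '?' then q + 1 else q
    if PySem.Chars.isdigit c then (vOf c, s, q') :: tri cs (s+1) q'
    else tri cs (s+1) q'

-- digits with prefix-'?'-counts (what B traverses)
def mkD : List Char → Int → List (Int × Int)
  | [], _ => []
  | c :: cs, q =>
    let q' := if c == '?' then q + 1 else q
    if PySem.Chars.isdigit c then (vOf c, q') :: mkD cs q'
    else mkD cs q'

-- running count at the LAST occurrence of digit value d in the history list
def lastQ : List (Int × Int) → Int → Option Int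
  | [], _ => none
  | p :: l, d =>
    match lastQ l d with
    | some x => some x
    | none => if p.1 = d then some p.2 else none

-- "some ordered pair of the list satisfies f"
def pairsAny {α : Type} (f : α → α → Bool) : List α → Bool
  | [] => false
  | a :: l => l.any (f a) || pairsAny f l

def p10 (a b : Int × Int) : Bool := a.1 + b.1 == 10
def badQ (a b : Int × Int) : Bool := (a.1 + b.1 == 10) && decide (b.2 - a.2 < 3)
def badSl (str : String) (a b : Int × Int) : Bool :=
  (a.1 + b.1 == 10) &&
    decide (PySem.Str.count (PySem.Str.slice str (some a.2) (some b.2)) "?" < 3)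

-- ---- generic pairsAny lemmas ----
theorem pairsAny_append {α : Type} (f : α → α → Bool) (l1 l2 : List α) :
    pairsAny f (l1 ++ l2) =
      (pairsAny f l1 || l1.any (fun a => l2.any (f a)) || pairsAny f l2) := by
  induction l1 with
  | nil => simp [pairsAny]
  | cons a l ih => simp only [List.cons_append, pairsAny, ih, List.any_append,
      List.any_cons, Bool.or_assoc]; ac_rfl

theorem pairsAny_append_singleton {α : Type} (f : α → α → Bool) (l : List α) (x : α) :
    pairsAny f (l ++ [x]) = (pairsAny f l || l.any (fun a => f a x)) := by
  simp [pairsAny_append, pairsAny, Bool.or_comm]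

theorem pairsAny_map {α β : Type} (f : β → β → Bool) (g : α → β) (l : List α) :
    pairsAny f (l.map g) = pairsAny (fun a b => f (g a) (g b)) l := by
  induction l with
  | nil => rfl
  | cons a l ih => simp [pairsAny, ih, List.any_map, Function.comp_def]

theorem pairsAny_congr {α : Type} {f g : α → α → Bool} {l : List α}
    (h : l.Pairwise (fun a b => f a b = g a b)) : pairsAny f l = pairsAny g l := by
  induction l with
  | nil => rfl
  | cons a l ih =>
    rcases List.pairwise_cons.1 h with ⟨h1, h2⟩
    have hany : l.any (f a) = l.any (g a) := by
      apply Bool.eq_iff_iff.2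
      simp only [List.any_eq_true]
      constructor
      · rintro ⟨x, hx, hfx⟩; exact ⟨x, hx, (h1 x hx) ▸ hfx⟩
      · rintro ⟨x, hx, hfx⟩; exact ⟨x, hx, (h1 x hx).symm ▸ hfx⟩
    simp [pairsAny, ih h2, hany]

-- ---- lastQ lemmas ----
theorem lastQ_append_singleton (l : List (Int × Int)) (e q d : Int) :
    lastQ (l ++ [(e, q)]) d = if e = d then some q else lastQ l d := by
  induction l with
  | nil => simp [lastQ]
  | cons p l ih =>
    simp only [List.cons_append, lastQ, ih]
    split_ifs <;> rfl

theorem lastQ_mem : ∀ {l : List (Int × Int)} {d x : Int}, lastQ l d = some x →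
    (d, x) ∈ l := by
  intro l d x
  induction l with
  | nil => intro h; cases h
  | cons p l ih =>
    intro h
    simp only [lastQ] at h
    cases hl : lastQ l d with
    | some y =>
      rw [hl] at h
      injection h with h'
      subst h'
      exact List.mem_cons_of_mem _ (ih hl)
    | none =>
      rw [hl] at h
      split_ifs at h with he
      injection h with h'
      subst h'
      have : p = (d, p.2) := by cases p; simp_all
      rw [← this]
      exact List.mem_cons_self

theorem lastQ_none : ∀ {l : List (Int × Int)} {d : Int}, lastQ l d = none →
    ∀ p ∈ l, p.1 ≠ d := by
  intro l d
  induction l with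
  | nil => simp
  | cons p l ih =>
    intro h b hb
    simp only [lastQ] at h
    cases hl : lastQ l d with
    | some y => rw [hl] at h; cases h
    | none =>
      rw [hl] at h
      split_ifs at h with he
      rcases List.mem_cons.1 hb with heq | hb
      · rw [heq]; exact he
      · exact ih hl b hb

theorem lastQ_max : ∀ {l : List (Int × Int)} {d x : Int},
    l.Pairwise (fun a b => a.2 ≤ b.2) → lastQ l d = some x →
    ∀ p ∈ l, p.1 = d → p.2 ≤ x := by
  intro l d x
  induction l with
  | nil => simp
  | cons a l ih =>
    intro hp hx p hm he
    rcases List.pairwise_cons.1 hp with ⟨h1, h2⟩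
    simp only [lastQ] at hx
    cases hl : lastQ l d with
    | some y =>
      rw [hl] at hx
      injection hx with hx'
      subst hx'
      rcases List.mem_cons.1 hm with heq | hm
      · rw [heq]; exact h1 _ (lastQ_mem hl)
      · exact ih h2 hl p hm he
    | none =>
      rw [hl] at hx
      split_ifs at hx with ha
      injection hx with hx'
      subst hx'
      rcases List.mem_cons.1 hm with heq | hm
      · rw [heq]
      · exact absurd he (lastQ_none hl p hm)

-- ---- tri / mkD structure lemmas ----
theorem tri_map_idx (cs : List Char) (s q : Int) :
    (tri cs s q).map (fun t => (t.1, t.2.1)) =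
      (PySem.List.enumerate cs s).filterMap
        (fun p => if PySem.Chars.isdigit p.2 then
                    some ((PySem.Int.ofChars? [p.2]).getD 0, p.1) else none) := by
  induction cs generalizing s q with
  | nil => simp [tri, PySem.List.enumerate_nil]
  | cons c cs ih =>
    rw [PySem.List.enumerate_cons]
    by_cases hd : PySem.Chars.isdigit c
    · simp [tri, hd, ih, vOf]
    · simp [tri, hd, ih]

theorem tri_map_q (cs : List Char) (s q : Int) :
    (tri cs s q).map (fun t => (t.1, t.2.2)) = mkD cs q := by
  induction cs generalizing s q with
  | nil => rfl
  | cons c cs ih =>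
    by_cases hd : PySem.Chars.isdigit c <;> simp [tri, mkD, hd, ih]

theorem tri_idx_lb (cs : List Char) (s q : Int) :
    ∀ t ∈ tri cs s q, s ≤ t.2.1 := by
  induction cs generalizing s q with
  | nil => simp [tri]
  | cons c cs ih =>
    intro t ht
    simp only [tri] at ht
    by_cases hd : PySem.Chars.isdigit c
    · rw [if_pos hd] at ht
      rcases List.mem_cons.1 ht with heq | ht
      · rw [heq]
      · have := ih (s+1) _ t ht; omega
    · rw [if_neg hd] at ht
      have := ih (s+1) _ t ht; omega

theorem tri_pairwise (cs : List Char) (s q : Int) :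
    (tri cs s q).Pairwise (fun t u => t.2.1 < u.2.1) := by
  induction cs generalizing s q with
  | nil => simp [tri]
  | cons c cs ih =>
    simp only [tri]
    by_cases hd : PySem.Chars.isdigit c
    · rw [if_pos hd]
      refine List.pairwise_cons.2 ⟨?_, ih _ _⟩
      intro u hu
      have := tri_idx_lb cs (s+1) _ u hu
      show s < u.2.1
      omega
    · rw [if_neg hd]
      exact ih _ _

theorem tri_rel (cs : List Char) (s q : Int) :
    ∀ t ∈ tri cs s q, t.2.2 = q + ((cs.take (t.2.1 - s).toNat).count '?' : Int) := by
  induction cs generalizing s q with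
  | nil => simp [tri]
  | cons c cs ih =>
    intro t ht
    by_cases hc : c = '?'
    · subst hc
      simp only [tri, beq_self_eq_true, if_true,
        show PySem.Chars.isdigit '?' = false from by decide,
        Bool.false_eq_true, if_false] at ht
      have h1 := ih (s+1) (q+1) t ht
      have h2 := tri_idx_lb cs (s+1) (q+1) t ht
      have hn : (t.2.1 - s).toNat = (t.2.1 - (s+1)).toNat + 1 := by omega
      rw [hn, List.take_succ_cons, List.count_cons]
      simp only [beq_self_eq_true, if_true]
      push_cast
      omega
    · have hb : (c == '?') = false := by simp [hc]
      simp only [tri, hb, Bool.false_eq_true, if_false] at ht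
      have tail : ∀ u ∈ tri cs (s+1) q,
          u.2.2 = q + (((c :: cs).take (u.2.1 - s).toNat).count '?' : Int) := by
        intro u hu
        have h1 := ih (s+1) q u hu
        have h2 := tri_idx_lb cs (s+1) q u hu
        have hn : (u.2.1 - s).toNat = (u.2.1 - (s+1)).toNat + 1 := by omega
        rw [hn, List.take_succ_cons, List.count_cons]
        simp only [hb, Bool.false_eq_true, if_false, Nat.add_zero]
        exact h1
      split_ifs at ht with hd
      · rcases List.mem_cons.1 ht with heq | ht2
        · rw [heq]; simp
        · exact tail t ht2
      · exact tail t ht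

-- ---- A-side characterization ----
theorem inner_spec (str : String) (a : Int × Int) (l : List (Int × Int)) (st : Bool × Bool) :
    qmInner str a l st = (st.1 && !(l.any (badSl str a)), st.2 || l.any (p10 a)) := by
  induction l generalizing st with
  | nil => simp [qmInner]
  | cons b l ih =>
    simp only [qmInner, List.any_cons]
    by_cases h10 : (a.1 + b.1 == 10) = true
    · rw [if_pos h10]
      by_cases hc : 3 ≤ PySem.Str.count (PySem.Str.slice str (some a.2) (some b.2)) "?"
      · rw [if_pos hc, ih]
        have hbad : badSl str a b = false := by
          simp only [badSl, h10, Bool.true_and, decide_eq_false_iff_not, Nat.not_lt]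
          exact hc
        simp [hbad, p10, h10]
      · rw [if_neg hc]
        have hbad : badSl str a b = true := by
          simp only [badSl, h10, Bool.true_and, decide_eq_true_eq]
          omega
        simp [hbad, p10, h10]
    · rw [if_neg h10, ih]
      have h10' : (a.1 + b.1 == 10) = false := Bool.eq_false_iff.2 h10
      have hbad : badSl str a b = false := by simp [badSl, h10']
      have hp : p10 a b = false := by simp [p10, h10']
      simp [hbad, hp]

theorem outer_spec (str : String) (l : List (Int × Int)) (st : Bool × Bool) :
    qmOuter str l st = (st.1 && !pairsAny (badSl str) l, st.2 || pairsAny p10 l) := by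
  induction l generalizing st with
  | nil => simp [qmOuter, pairsAny]
  | cons a l ih =>
    rw [qmOuter, ih, inner_spec]
    simp [pairsAny, Bool.and_assoc, Bool.or_assoc]

def QuestionsMarksNums (str : String) : List (Int × Int) :=
  (PySem.List.enumerate str.toList).filterMap
    (fun p => if PySem.Chars.isdigit p.2 then
                some ((PySem.Int.ofChars? [p.2]).getD 0, p.1) else none)

theorem bool_if_id (x y : Bool) : (if (false || x) = false then false else (true && y)) = (x && y) := by
  cases x <;> cases y <;> rfl

theorem A_char (str : String) :
    QuestionsMarks str =
      (pairsAny p10 (QuestionsMarksNums str) && !pairsAny (badSl str) (QuestionsMarksNums str)) := by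
  simp only [QuestionsMarks, QuestionsMarksNums]
  rw [outer_spec]
  exact bool_if_id _ _

-- ---- counting a single character ----
theorem count_go_single (c : Char) : ∀ (l : List Char) (fuel acc : Nat), l.length ≤ fuel →
    PySem.Chars.count.go [c] fuel l acc = acc + l.count c := by
  intro l
  induction l with
  | nil => intro fuel acc h; cases fuel <;> simp [PySem.Chars.count.go]
  | cons x t ih =>
    intro fuel acc h
    cases fuel with
    | zero => simp at h
    | succ f =>
      have hlen : t.length ≤ f := by simpa using h
      by_cases hx : x = c
      · have hpre : List.isPrefixOf [c] (x :: t) = true := by simp [List.isPrefixOf, hx]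
        have hstep : PySem.Chars.count.go [c] (f+1) (x :: t) acc
            = PySem.Chars.count.go [c] f t (acc+1) := by
          simp [PySem.Chars.count.go, hpre]
        rw [hstep, ih f (acc+1) hlen, List.count_cons]
        simp [hx]
        omega
      · have hx' : ¬ c = x := Ne.symm hx
        have hpre : List.isPrefixOf [c] (x :: t) = false := by
          simp [List.isPrefixOf, beq_eq_false_iff_ne.2 hx']
        have hstep : PySem.Chars.count.go [c] (f+1) (x :: t) acc
            = PySem.Chars.count.go [c] f t acc := by
          simp [PySem.Chars.count.go, hpre]
        rw [hstep, ih f acc hlen, List.count_cons]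
        simp [hx]

theorem count_single (l : List Char) (c : Char) :
    PySem.Chars.count l [c] = l.count c := by
  simp only [PySem.Chars.count, List.isEmpty_cons, Bool.false_eq_true, if_false]
  simpa using count_go_single c l l.length 0 le_rfl

-- '?'-count of a slice is a difference of prefix counts
theorem slice_count (str : String) (a b : Int) (h0 : 0 ≤ a) (hab : a ≤ b) :
    (PySem.Str.count (PySem.Str.slice str (some a) (some b)) "?" : Int)
      = ((str.toList.take b.toNat).count '?' : Int)
        - ((str.toList.take a.toNat).count '?' : Int) := by
  rw [PySem.Str.count_eq, PySem.Str.toList_slice]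
  have hq : ("?" : String).toList = ['?'] := rfl
  rw [hq]
  have hs : PySem.Chars.slice str.toList (some a) (some b)
      = (str.toList.drop a.toNat).take (b.toNat - a.toNat) := by
    rw [PySem.Chars.slice_eq_listSlice, PySem.List.slice_toNat _ h0 (le_trans h0 hab)]
  rw [hs, count_single]
  have hab' : a.toNat ≤ b.toNat := by omega
  have : str.toList.take b.toNat
      = str.toList.take a.toNat ++ (str.toList.drop a.toNat).take (b.toNat - a.toNat) := by
    rw [← List.take_add]
    congr 1
    omega
  rw [this, List.count_append]
  push_cast
  omega

-- ---- B-side characterization ----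
theorem altGo_spec (rest : List Char) :
    ∀ (q : Int) (last : PySem.Dict Int Int) (has10 : Bool) (hl : List (Int × Int)),
    (∀ e, last.get? e = lastQ hl e) →
    (∀ p ∈ hl, p.2 ≤ q) →
    hl.Pairwise (fun a b => a.2 ≤ b.2) →
    has10 = pairsAny p10 hl →
    pairsAny badQ hl = false →
    qmAltGo q last has10 rest =
      (pairsAny p10 (hl ++ mkD rest q) && !pairsAny badQ (hl ++ mkD rest q)) := by
  induction rest with
  | nil =>
    intro q last has10 hl h1 h2 h3 h4 h5
    simp [qmAltGo, mkD, h4, h5]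
  | cons ch rest ih =>
    intro q last has10 hl h1 h2 h3 h4 h5
    simp only [qmAltGo, mkD]
    have h2' : ∀ p ∈ hl, p.2 ≤ (if ch == '?' then q + 1 else q) := by
      intro p hp
      have := h2 p hp
      split_ifs <;> omega
    set q' : Int := if ch == '?' then q + 1 else q with hq'
    by_cases hd : PySem.Chars.isdigit ch
    · rw [if_pos hd, if_pos hd]
      set d : Int := (PySem.Int.ofChars? [ch]).getD 0 with hdv
      have hvd : vOf ch = d := rfl
      have happ : hl ++ (vOf ch, q') :: mkD rest q' = (hl ++ [(d, q')]) ++ mkD rest q' := by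
        rw [hvd, List.append_assoc]; rfl
      cases hg : last.get? (10 - d) with
      | some qi =>
        dsimp only
        have hlq : lastQ hl (10 - d) = some qi := by rw [← h1]; exact hg
        have hmemq : ((10 : Int) - d, qi) ∈ hl := lastQ_mem hlq
        by_cases hlt : q' - qi < 3
        · rw [if_pos hlt]
          have hbadpair : pairsAny badQ (hl ++ (vOf ch, q') :: mkD rest q') = true := by
            rw [pairsAny_append]
            have : hl.any (fun a => ((vOf ch, q') :: mkD rest q').any (badQ a)) = true := by
              rw [List.any_eq_true]
              refine ⟨(10 - d, qi), hmemq, ?_⟩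
              rw [List.any_eq_true]
              refine ⟨(vOf ch, q'), List.mem_cons_self, ?_⟩
              simp only [badQ, hvd]
              simp only [decide_eq_true_eq, Bool.and_eq_true, beq_iff_eq]
              constructor
              · ring
              · exact hlt
            rw [this]
            simp
          rw [hbadpair]
          simp
        · rw [if_neg hlt]
          rw [happ]
          refine ih q' (last.insert d q') true (hl ++ [(d, q')]) ?_ ?_ ?_ ?_ ?_
          · intro e
            rw [PySem.Dict.get?_insert, lastQ_append_singleton]
            by_cases he : e = d
            · rw [if_pos he, if_pos (by omega)]
            · rw [if_neg he, if_neg (by omega)]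
              exact h1 e
          · intro p hp
            rcases List.mem_append.1 hp with hp | hp
            · exact h2' p hp
            · simp at hp; rw [hp]
          · rw [List.pairwise_append]
            refine ⟨h3, by simp, ?_⟩
            intro p hp u hu
            simp at hu; rw [hu]
            exact h2' p hp
          · rw [pairsAny_append_singleton]
            have : hl.any (fun a => p10 a (d, q')) = true := by
              rw [List.any_eq_true]
              refine ⟨(10 - d, qi), hmemq, ?_⟩
              simp only [p10, beq_iff_eq]
              ring
            rw [this]
            simp
          · rw [pairsAny_append_singleton, h5]
            simp only [Bool.false_or, List.any_eq_false]
            intro p hp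
            simp only [badQ, Bool.and_eq_true, beq_iff_eq, decide_eq_true_eq, not_and]
            intro hsum
            have hp1 : p.1 = 10 - d := by omega
            have hle : p.2 ≤ qi := lastQ_max h3 hlq p hp hp1
            omega
      | none =>
        dsimp only
        have hlq : lastQ hl (10 - d) = none := by rw [← h1]; exact hg
        have hno : ∀ p ∈ hl, p.1 ≠ 10 - d := lastQ_none hlq
        rw [happ]
        refine ih q' (last.insert d q') has10 (hl ++ [(d, q')]) ?_ ?_ ?_ ?_ ?_
        · intro e
          rw [PySem.Dict.get?_insert, lastQ_append_singleton]
          by_cases he : e = d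
          · rw [if_pos he, if_pos (by omega)]
          · rw [if_neg he, if_neg (by omega)]
            exact h1 e
        · intro p hp
          rcases List.mem_append.1 hp with hp | hp
          · exact h2' p hp
          · simp at hp; rw [hp]
        · rw [List.pairwise_append]
          refine ⟨h3, by simp, ?_⟩
          intro p hp u hu
          simp at hu; rw [hu]
          exact h2' p hp
        · rw [pairsAny_append_singleton, h4]
          have : hl.any (fun a => p10 a (d, q')) = false := by
            rw [List.any_eq_false]
            intro p hp
            simp only [p10, beq_iff_eq]
            intro hsum
            exact hno p hp (by omega)
          rw [this]
          simp
        · rw [pairsAny_append_singleton, h5]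
          simp only [Bool.false_or, List.any_eq_false]
          intro p hp
          simp only [badQ, Bool.and_eq_true, beq_iff_eq, decide_eq_true_eq, not_and]
          intro hsum _
          exact hno p hp (by omega)
    · rw [if_neg hd, if_neg hd]
      exact ih q' last has10 hl h1 h2' h3 h4 h5

theorem B_char (str : String) :
    QuestionsMarks_alt str =
      (pairsAny p10 (mkD str.toList 0) && !pairsAny badQ (mkD str.toList 0)) := by
  have := altGo_spec str.toList 0 PySem.Dict.empty false []
    (by intro e; simp [PySem.Dict.get?_empty, lastQ])
    (by simp) (by simp) (by simp [pairsAny]) (by simp [pairsAny])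
  simpa [QuestionsMarks_alt] using this

-- ---- transfer: A's (value, index) pairs and B's (value, count) pairs agree ----
theorem transfer_p10 (str : String) :
    pairsAny p10 (QuestionsMarksNums str) = pairsAny p10 (mkD str.toList 0) := by
  rw [QuestionsMarksNums, ← tri_map_idx str.toList 0 0, ← tri_map_q str.toList 0 0]
  rw [pairsAny_map, pairsAny_map]
  rfl

theorem transfer_bad (str : String) :
    pairsAny (badSl str) (QuestionsMarksNums str) = pairsAny badQ (mkD str.toList 0) := by
  rw [QuestionsMarksNums, ← tri_map_idx str.toList 0 0, ← tri_map_q str.toList 0 0]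
  rw [pairsAny_map, pairsAny_map]
  apply pairsAny_congr
  have hpw := tri_pairwise str.toList 0 0
  refine hpw.imp_of_mem ?_
  intro t u hmt hmu hlt
  have hlbt := tri_idx_lb str.toList 0 0 t hmt
  have hlbu := tri_idx_lb str.toList 0 0 u hmu
  have hrt := tri_rel str.toList 0 0 t hmt
  have hru := tri_rel str.toList 0 0 u hmu
  simp only [Int.sub_zero] at hrt hru
  simp only [badSl, badQ]
  congr 1
  have hc := slice_count str t.2.1 u.2.1 (by omega) (by omega)
  rw [decide_eq_decide]
  omega

-- ===== VERDICT (by name: the statement is the Claim_ definition above) =====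
theorem QuestionsMarks_spec : Claim_equal_QuestionsMarks := by
  intro str _
  unfold Spec_QuestionsMarks
  rw [A_char, B_char, transfer_p10, transfer_bad]
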